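-- pv_equiv track=rewrite | github.com/EUNJEONGMUN/CodingTest | programmers/SkillCheck/level2/2.py | solution
-- ===== SOURCE A (Python) =====
-- from collections import deque
--
-- def solution(order):
--     order = deque(order)
--     num = deque(range(1, len(order)+1))
--     stack = []
--     answer = 0
--     while order:
--         if num:
--             if order[0] == num[0]:
--                 answer += 1
--                 order.popleft()
--                 num.popleft()
--             elif order[0] > num[0]:
--                 stack.append(num.popleft())
--             elif order[0] < num[0]:
--                 if stack and order[0] == stack[-1]:
--                     answer += 1
--                     stack.pop()
--                     order.popleft()
--                 else:
--                     break
--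
--         while stack and order:
--             if order[0] == stack[-1]:
--                 answer += 1
--                 stack.pop()
--                 order.popleft()
--             else:
--                 break
--
--     return answer
-- ===== SOURCE B (Python) =====
-- def solution(order):
--     # Standard "validate stack sequence" algorithm: iterate over the SUPPLY of
--     # boxes 1..n, pushing each eagerly, and after every push pop while the stack
--     # top matches the next pending request.  The served count is how much of
--     # `order` got consumed.  (A instead scans `order` with two deques and a
--     # three-way front comparison.)
--     pending = list(order)      # requests not yet served, next one at the end
--     pending.reverse()
--     stack = []
--     for box in range(1, len(order) + 1):
--         stack.append(box)
--         while stack and pending and stack[-1] == pending[-1]: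
--             stack.pop()
--             pending.pop()
--     return len(order) - len(pending)
-- ===== Notes on version B (the rewrite author's own statement) =====
-- stated objective: idiomatic
-- what changed: B iterates over the supply of box numbers 1..n (push each, then pop while the top matches the next pending request) instead of A's scan of `order` with two deques and a three-way front comparison plus a nested drain loop; B always terminates, whereas Python A loops forever on some inputs (there the fuelled port of A returns the partial count, equal to B's value).
import Mathlib
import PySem

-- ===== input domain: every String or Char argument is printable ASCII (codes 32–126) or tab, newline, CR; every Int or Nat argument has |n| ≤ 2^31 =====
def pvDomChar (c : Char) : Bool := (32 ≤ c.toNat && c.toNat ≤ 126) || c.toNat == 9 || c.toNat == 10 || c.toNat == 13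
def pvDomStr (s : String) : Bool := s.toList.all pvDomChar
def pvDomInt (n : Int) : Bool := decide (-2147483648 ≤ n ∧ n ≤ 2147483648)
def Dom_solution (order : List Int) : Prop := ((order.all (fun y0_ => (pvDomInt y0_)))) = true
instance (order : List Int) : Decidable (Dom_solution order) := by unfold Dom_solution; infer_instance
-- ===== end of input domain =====

-- B iterates over the supply of box numbers 1..n (push each, pop while the top matches
-- the next pending request) instead of A's dual-deque scan of `order` (objective: idiomatic).

-- ===== PORT A =====
-- the nested `while stack and order:` loop of A; the front of `order` is the list
-- head, the top of `stack` is the list head. Returns the updated (order, stack, answer).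
def solutionInner : List Int → List Int → Int → List Int × List Int × Int
  | o :: os, t :: ts, ans => if o = t then solutionInner os ts (ans + 1) else (o :: os, t :: ts, ans)
  | os, ss, ans => (os, ss, ans)

-- the outer `while order:` loop of A, step for step.  `fuel` bounds the number of
-- outer iterations: every terminating run of the Python uses at most
-- 2*len(order)+1 of them (each iteration pops from num or from order, or returns);
-- when fuel runs out the current `answer` is returned (this happens only on inputs
-- where the Python loops forever with a stationary state, and equals B's value there).
def solutionOuter : Nat → List Int → List Int → List Int → Int → Int
  | 0, _, _, _, ans => ans
  | fuel + 1, order, num, stack, ans =>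
    match order with
    | [] => ans
    | o :: os =>
      match num with
      | [] =>
        -- `if num:` is skipped; only the inner while runs, then the outer loop repeats
        let r := solutionInner (o :: os) stack ans
        solutionOuter fuel r.1 [] r.2.1 r.2.2
      | k :: ks =>
        if o = k then
          let r := solutionInner os stack (ans + 1)
          solutionOuter fuel r.1 ks r.2.1 r.2.2
        else if k < o then
          let r := solutionInner (o :: os) (k :: stack) ans
          solutionOuter fuel r.1 ks r.2.1 r.2.2
        else
          match stack with
          | t :: ts =>
            if o = t then
              let r := solutionInner os ts (ans + 1)
              solutionOuter fuel r.1 (k :: ks) r.2.1 r.2.2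
            else ans  -- break
          | [] => ans  -- break

def solution (order : List Int) : Int :=
  solutionOuter (2 * order.length + 1) order
    (PySem.List.pyRange 1 ((order.length : Int) + 1) 1) [] 0

-- ===== PORT B =====
-- `while stack and pending and stack[-1] == pending[-1]: stack.pop(); pending.pop()`
-- `pending` is kept as a forward list whose HEAD is the next request (the Python keeps
-- it reversed so that pending[-1] is the next request — same list read from the end).
def altInner : List Int → List Int → List Int × List Int
  | t :: ts, o :: os => if t = o then altInner ts os else (t :: ts, o :: os)
  | ss, os => (ss, os)

-- `for box in range(1, len(order)+1): stack.append(box); <inner while>`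
def solution_alt (order : List Int) : Int :=
  let st := (PySem.List.pyRange 1 ((order.length : Int) + 1) 1).foldl
      (fun (st : List Int × List Int) box => altInner (box :: st.1) st.2) ([], order)
  (order.length : Int) - (st.2.length : Int)

-- ===== PRECONDITION & SPEC =====
-- No Pre_: the ports are equal on every input.  (Python A itself loops forever on
-- some inputs — e.g. [3,1,2] — with a stationary loop state; the fuelled port
-- returns the answer accumulated up to that point, which is exactly what B returns.)
def Spec_solution (order : List Int) (out : Int) : Prop := out = solution_alt order
instance (order : List Int) (out : Int) : Decidable (Spec_solution order out) := by
  unfold Spec_solution; infer_instance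

-- ===== CLAIM (what is proved, stated in full; the proofs are below) =====
def Claim_equal_solution : Prop :=
  ∀ (order : List Int), Dom_solution order → Spec_solution order (solution order)

-- ===== LEMMAS AND PROOFS =====

-- the lazy single-stack loop of the previous analysis, used only as a PROOF BRIDGE
-- between the two ports: push the next unused number until the top matches, then pop.
def solutionPush (n nxt : Int) (stack : List Int) (o : Int) : Int × List Int :=
  if h : nxt ≤ n ∧ (stack = [] ∨ stack.head? ≠ some o) then
    solutionPush n (nxt + 1) (nxt :: stack) o
  else (nxt, stack)
termination_by (n + 1 - nxt).toNat
decreasing_by omega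

def solutionGo : List Int → Int → Int → List Int → Int → Int
  | [], _, _, _, ans => ans
  | o :: os, n, nxt, stack, ans =>
    let r := solutionPush n nxt stack o
    match r.2 with
    | t :: ts => if t = o then solutionGo os n r.1 ts (ans + 1) else ans
    | [] => ans

-- solutionInner's result is a fixpoint of solutionInner
lemma inner_fix : ∀ (os ss : List Int) (ans : Int),
    solutionInner (solutionInner os ss ans).1 (solutionInner os ss ans).2.1
      (solutionInner os ss ans).2.2 = solutionInner os ss ans := by
  intro os
  induction os with
  | nil => intro ss ans; simp [solutionInner]
  | cons o os ih =>
    intro ss ans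
    cases ss with
    | nil => simp [solutionInner]
    | cons t ts =>
      by_cases h : o = t
      · simp only [solutionInner, if_pos h]; exact ih ts (ans + 1)
      · simp [solutionInner, h]

-- the result stack of solutionInner is a suffix of the input stack
lemma inner_stack_mem : ∀ (os ss : List Int) (ans : Int) (x : Int),
    x ∈ (solutionInner os ss ans).2.1 → x ∈ ss := by
  intro os
  induction os with
  | nil => intro ss ans x hx; simp [solutionInner] at hx; simp [hx]
  | cons o os ih =>
    intro ss ans x hx
    cases ss with
    | nil => simp [solutionInner] at hx
    | cons t ts =>
      by_cases h : o = t
      · simp only [solutionInner, if_pos h] at hx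
        exact List.mem_cons_of_mem t (ih ts (ans + 1) x hx)
      · simpa [solutionInner, h] using hx

-- the result order of solutionInner is no longer than the input order
lemma inner_order_len : ∀ (os ss : List Int) (ans : Int),
    (solutionInner os ss ans).1.length ≤ os.length := by
  intro os
  induction os with
  | nil => intro ss ans; simp [solutionInner]
  | cons o os ih =>
    intro ss ans
    cases ss with
    | nil => simp [solutionInner]
    | cons t ts =>
      by_cases h : o = t
      · simp only [solutionInner, if_pos h]
        exact le_trans (ih ts (ans + 1)) (by simp)
      · simp [solutionInner, h]

-- once the state is a fixpoint of solutionInner and num is empty, the outer loop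
-- never changes anything and any fuel returns the current answer
lemma outer_empty_fix : ∀ (fuel : Nat) (os ss : List Int) (ans : Int),
    solutionInner os ss ans = (os, ss, ans) →
    solutionOuter fuel os [] ss ans = ans := by
  intro fuel
  induction fuel with
  | zero => intro os ss ans _; rfl
  | succ fuel ih =>
    intro os ss ans hfix
    cases os with
    | nil => rfl
    | cons o os =>
      show solutionOuter fuel (solutionInner (o :: os) ss ans).1 []
        (solutionInner (o :: os) ss ans).2.1 (solutionInner (o :: os) ss ans).2.2 = ans
      rw [hfix]
      exact ih (o :: os) ss ans hfix

-- one unfolding of solutionPush when the loop condition holds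
lemma push_step {n nxt : Int} {stack : List Int} {o : Int}
    (h1 : nxt ≤ n) (h2 : stack = [] ∨ stack.head? ≠ some o) :
    solutionPush n nxt stack o = solutionPush n (nxt + 1) (nxt :: stack) o := by
  rw [solutionPush]; rw [dif_pos ⟨h1, h2⟩]

-- solutionPush does nothing when num is exhausted
lemma push_stop {n nxt : Int} {stack : List Int} {o : Int} (h : n < nxt) :
    solutionPush n nxt stack o = (nxt, stack) := by
  rw [solutionPush]
  rw [dif_neg (by intro hc; exact absurd hc.1 (by omega))]

-- if the sought value is below every value solutionPush could push and below the
-- current top, the final top (if any) still differs from it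
lemma push_top_ne : ∀ (c : Nat) (n nxt : Int) (stack : List Int) (o : Int),
    c = (n + 1 - nxt).toNat → o < nxt →
    (∀ t ∈ stack.head?, t ≠ o) →
    (∀ t ∈ (solutionPush n nxt stack o).2.head?, t ≠ o) := by
  intro c
  induction c using Nat.strong_induction_on with
  | _ c ih =>
    intro n nxt stack o hc ho hhd
    by_cases h : nxt ≤ n ∧ (stack = [] ∨ stack.head? ≠ some o)
    · rw [solutionPush, dif_pos h]
      exact ih (n + 1 - (nxt + 1)).toNat (by omega) n (nxt + 1) (nxt :: stack) o rfl
        (by omega) (by intro t ht; simp at ht; omega)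
    · rw [solutionPush, dif_neg h]; exact hhd

-- the lazy loop absorbs a run of solutionInner: each stack-top match is one iteration
-- of solutionGo in which solutionPush does nothing
lemma go_inner : ∀ (os ss : List Int) (ans n nxt : Int),
    solutionGo os n nxt ss ans =
      solutionGo (solutionInner os ss ans).1 n nxt
        (solutionInner os ss ans).2.1 (solutionInner os ss ans).2.2 := by
  intro os
  induction os with
  | nil => intro ss ans n nxt; simp [solutionInner]
  | cons o os ih =>
    intro ss ans n nxt
    cases ss with
    | nil => simp [solutionInner]
    | cons t ts =>
      by_cases h : o = t
      · simp only [solutionInner, if_pos h]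
        have hpush : solutionPush n nxt (t :: ts) o = (nxt, t :: ts) := by
          rw [solutionPush]
          rw [dif_neg (by simp [h.symm])]
        calc solutionGo (o :: os) n nxt (t :: ts) ans
            = solutionGo os n nxt ts (ans + 1) := by
              show (let r := solutionPush n nxt (t :: ts) o;
                match r.2 with
                | t' :: ts' => if t' = o then solutionGo os n r.1 ts' (ans + 1) else ans
                | [] => ans) = _
              rw [hpush]; simp [h.symm]
          _ = _ := ih ts (ans + 1) n nxt
      · simp [solutionInner, h]

-- when num is exhausted, the lazy loop computes exactly the answer of the residual
-- inner-while run of A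
lemma go_no_num : ∀ (os ss : List Int) (ans n nxt : Int), n < nxt →
    solutionGo os n nxt ss ans = (solutionInner os ss ans).2.2 := by
  intro os
  induction os with
  | nil => intro ss ans n nxt _; simp [solutionInner, solutionGo]
  | cons o os ih =>
    intro ss ans n nxt hn
    have hpush := push_stop (stack := ss) (o := o) hn
    cases ss with
    | nil =>
      show (let r := solutionPush n nxt [] o;
        match r.2 with
        | t' :: ts' => if t' = o then solutionGo os n r.1 ts' (ans + 1) else ans
        | [] => ans) = _
      rw [hpush]; simp [solutionInner]
    | cons t ts =>
      show (let r := solutionPush n nxt (t :: ts) o;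
        match r.2 with
        | t' :: ts' => if t' = o then solutionGo os n r.1 ts' (ans + 1) else ans
        | [] => ans) = _
      rw [hpush]
      by_cases h : o = t
      · simp only [solutionInner, h]
        simpa using ih ts (ans + 1) n nxt hn
      · simp [solutionInner, h, Ne.symm h]

-- main loop correspondence for A: A's outer loop on num = [k..n] equals the lazy loop
-- with counter k, provided the stack only holds values below k and fuel is sufficient
lemma main_loop (n : Int) : ∀ (fuel : Nat) (order : List Int) (k : Int)
    (stack : List Int) (ans : Int),
    (∀ x ∈ stack, x < k) →
    order.length + (n + 1 - k).toNat + 1 ≤ fuel →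
    solutionOuter fuel order (PySem.List.pyRange k (n + 1) 1) stack ans =
      solutionGo order n k stack ans := by
  intro fuel
  induction fuel with
  | zero => intro order k stack ans _ hf; omega
  | succ fuel ih =>
    intro order k stack ans hst hf
    cases order with
    | nil => simp [solutionOuter, solutionGo]
    | cons o os =>
      by_cases hkn : k ≤ n
      case neg =>
        rw [PySem.List.pyRange_one_eq_nil (by omega)]
        show solutionOuter fuel (solutionInner (o :: os) stack ans).1 []
          (solutionInner (o :: os) stack ans).2.1 (solutionInner (o :: os) stack ans).2.2
          = solutionGo (o :: os) n k stack ans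
        rw [go_no_num (o :: os) stack ans n k (by omega)]
        exact outer_empty_fix fuel _ _ _ (inner_fix (o :: os) stack ans)
      case pos =>
      rw [PySem.List.pyRange_one_cons (by omega : k < n + 1)]
      by_cases hok : o = k
      case pos =>
        have hstep : solutionOuter (fuel + 1) (o :: os) (k :: PySem.List.pyRange (k + 1) (n + 1) 1) stack ans
            = solutionOuter fuel (solutionInner os stack (ans + 1)).1
                (PySem.List.pyRange (k + 1) (n + 1) 1)
                (solutionInner os stack (ans + 1)).2.1 (solutionInner os stack (ans + 1)).2.2 := by
          show (if o = k then _ else _) = _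
          rw [if_pos hok]
        rw [hstep]
        have hIH := ih (solutionInner os stack (ans + 1)).1 (k + 1)
          (solutionInner os stack (ans + 1)).2.1 (solutionInner os stack (ans + 1)).2.2
          (fun x hx => lt_of_lt_of_le (hst x (inner_stack_mem os stack (ans + 1) x hx)) (by omega))
          (by have := inner_order_len os stack (ans + 1); simp at hf ⊢; omega)
        rw [hIH, ← go_inner os stack (ans + 1) n (k + 1)]
        have hpush : solutionPush n k stack o = (k + 1, k :: stack) := by
          rw [push_step hkn ?side]
          case side =>
            cases stack with
            | nil => exact Or.inl rfl
            | cons t ts =>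
              refine Or.inr ?_
              have := hst t (by simp)
              simp only [List.head?_cons, ne_eq, Option.some.injEq]
              omega
          rw [solutionPush, dif_neg (by simp [hok])]
        show _ = (let r := solutionPush n k stack o;
          match r.2 with
          | t' :: ts' => if t' = o then solutionGo os n r.1 ts' (ans + 1) else ans
          | [] => ans)
        rw [hpush]; simp [hok]
      case neg =>
      by_cases hko : k < o
      case pos =>
        have hfix : solutionInner (o :: os) (k :: stack) ans = (o :: os, k :: stack, ans) := by
          simp [solutionInner]; omega
        have hstep : solutionOuter (fuel + 1) (o :: os) (k :: PySem.List.pyRange (k + 1) (n + 1) 1) stack ans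
            = solutionOuter fuel (o :: os) (PySem.List.pyRange (k + 1) (n + 1) 1) (k :: stack) ans := by
          show (if o = k then _ else if k < o then _ else _) = _
          rw [if_neg hok, if_pos hko, hfix]
        rw [hstep]
        have hIH := ih (o :: os) (k + 1) (k :: stack) ans
          (by intro x hx; rcases List.mem_cons.mp hx with h | h
              · omega
              · exact lt_of_lt_of_le (hst x h) (by omega))
          (by simp at hf ⊢; omega)
        rw [hIH]
        have hpush : solutionPush n k stack o = solutionPush n (k + 1) (k :: stack) o := by
          apply push_step hkn
          cases stack with
          | nil => exact Or.inl rfl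
          | cons t ts =>
            refine Or.inr ?_
            have := hst t (by simp)
            simp only [List.head?_cons, ne_eq, Option.some.injEq]
            omega
        show solutionGo (o :: os) n (k + 1) (k :: stack) ans = solutionGo (o :: os) n k stack ans
        show _ = (let r := solutionPush n k stack o;
          match r.2 with
          | t' :: ts' => if t' = o then solutionGo os n r.1 ts' (ans + 1) else ans
          | [] => ans)
        rw [hpush]
        rfl
      case neg =>
        have hok' : o < k := by omega
        cases stack with
        | nil =>
          have hstep : solutionOuter (fuel + 1) (o :: os) (k :: PySem.List.pyRange (k + 1) (n + 1) 1) [] ans = ans := by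
            show (if o = k then _ else if k < o then _ else _) = _
            rw [if_neg hok, if_neg hko]
          rw [hstep]
          have htop := push_top_ne (n + 1 - k).toNat n k [] o rfl hok' (by simp)
          show _ = (let r := solutionPush n k [] o;
            match r.2 with
            | t' :: ts' => if t' = o then solutionGo os n r.1 ts' (ans + 1) else ans
            | [] => ans)
          rcases hres : (solutionPush n k [] o).2 with _ | ⟨t', ts'⟩
          · simp [hres]
          · rw [hres] at htop
            have : t' ≠ o := htop t' (by simp)
            simp [hres, this]
        | cons t ts =>
          by_cases hot : o = t
          case pos =>
            have hstep : solutionOuter (fuel + 1) (o :: os) (k :: PySem.List.pyRange (k + 1) (n + 1) 1) (t :: ts) ans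
                = solutionOuter fuel (solutionInner os ts (ans + 1)).1
                    (k :: PySem.List.pyRange (k + 1) (n + 1) 1)
                    (solutionInner os ts (ans + 1)).2.1 (solutionInner os ts (ans + 1)).2.2 := by
              show (if o = k then _ else if k < o then _ else if o = t then _ else _) = _
              rw [if_neg hok, if_neg hko, if_pos hot]
            rw [hstep, ← PySem.List.pyRange_one_cons (by omega : k < n + 1)]
            have hIH := ih (solutionInner os ts (ans + 1)).1 k
              (solutionInner os ts (ans + 1)).2.1 (solutionInner os ts (ans + 1)).2.2
              (fun x hx => hst x (List.mem_cons_of_mem t (inner_stack_mem os ts (ans + 1) x hx)))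
              (by have := inner_order_len os ts (ans + 1); simp at hf ⊢; omega)
            rw [hIH, ← go_inner os ts (ans + 1) n k]
            have hpush : solutionPush n k (t :: ts) o = (k, t :: ts) := by
              rw [solutionPush]
              rw [dif_neg (by simp [hot.symm])]
            show _ = (let r := solutionPush n k (t :: ts) o;
              match r.2 with
              | t' :: ts' => if t' = o then solutionGo os n r.1 ts' (ans + 1) else ans
              | [] => ans)
            rw [hpush]; simp [hot.symm]
          case neg =>
            have hstep : solutionOuter (fuel + 1) (o :: os) (k :: PySem.List.pyRange (k + 1) (n + 1) 1) (t :: ts) ans = ans := by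
              show (if o = k then _ else if k < o then _ else if o = t then _ else _) = _
              rw [if_neg hok, if_neg hko, if_neg hot]
            rw [hstep]
            have htop := push_top_ne (n + 1 - k).toNat n k (t :: ts) o rfl hok'
              (by intro x hx; simp at hx; subst hx; exact fun hc => hot hc.symm)
            show _ = (let r := solutionPush n k (t :: ts) o;
              match r.2 with
              | t' :: ts' => if t' = o then solutionGo os n r.1 ts' (ans + 1) else ans
              | [] => ans)
            rcases hres : (solutionPush n k (t :: ts) o).2 with _ | ⟨t', ts'⟩
            · simp [hres]
            · rw [hres] at htop
              have : t' ≠ o := htop t' (by simp)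
              simp [hres, this]

lemma A_eq_lazy (order : List Int) :
    solution order = solutionGo order (order.length : Int) 1 [] 0 := by
  unfold solution
  have := main_loop (order.length : Int) (2 * order.length + 1) order 1 [] 0
    (by simp) (by omega)
  simpa using this

-- ===== eager (B) = lazy bridge =====

-- altInner's result stack is no longer than the input stack
lemma alt_len : ∀ (ss os : List Int), (altInner ss os).1.length ≤ ss.length := by
  intro ss
  induction ss with
  | nil => intro os; cases os <;> simp [altInner]
  | cons t ts ih =>
    intro os
    cases os with
    | nil => simp [altInner]
    | cons o os =>
      by_cases h : t = o
      · simp only [altInner, if_pos h]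
        exact le_trans (ih os) (by simp)
      · simp [altInner, h]

-- altInner's result is a fixpoint of altInner
lemma alt_fix : ∀ (ss os : List Int),
    altInner (altInner ss os).1 (altInner ss os).2 = altInner ss os := by
  intro ss
  induction ss with
  | nil => intro os; cases os <;> simp [altInner]
  | cons t ts ih =>
    intro os
    cases os with
    | nil => simp [altInner]
    | cons o os =>
      by_cases h : t = o
      · simp only [altInner, if_pos h]; exact ih os
      · simp [altInner, h]

-- at a fixpoint of altInner with both lists nonempty, the top differs from the next request
lemma alt_fix_top_ne {t o : Int} {ts os : List Int}
    (h : altInner (t :: ts) (o :: os) = (t :: ts, o :: os)) : t ≠ o := by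
  intro he
  have h1 : altInner (t :: ts) (o :: os) = altInner ts os := by
    simp [altInner, he]
  rw [h1] at h
  have := alt_len ts os
  have := congrArg (fun p => p.1.length) h
  simp at this
  omega

-- altInner is solutionInner with the roles of the two lists swapped and the count
-- recovered from the number of popped requests
lemma inner_alt : ∀ (ss os : List Int) (ans : Int),
    solutionInner os ss ans =
      ((altInner ss os).2, (altInner ss os).1,
        ans + (os.length : Int) - ((altInner ss os).2.length : Int)) := by
  intro ss
  induction ss with
  | nil => intro os ans; cases os <;> simp [altInner, solutionInner]
  | cons t ts ih =>
    intro os ans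
    cases os with
    | nil => simp [altInner, solutionInner]
    | cons o os =>
      by_cases h : t = o
      · simp only [altInner, if_pos h, solutionInner, if_pos h.symm]
        rw [ih os (ans + 1)]
        refine Prod.ext rfl (Prod.ext rfl ?_)
        simp only [List.length_cons]
        push_cast
        omega
      · simp [altInner, solutionInner, h, Ne.symm h]

-- the eager fold never revives an empty pending list
lemma fold_pending_nil : ∀ (ks ss : List Int),
    ((ks.foldl (fun (st : List Int × List Int) box => altInner (box :: st.1) st.2)
      (ss, ([] : List Int)))).2 = [] := by
  intro ks
  induction ks with
  | nil => intro ss; rfl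
  | cons k ks ih =>
    intro ss
    show ((ks.foldl _ (altInner (k :: ss) []))).2 = []
    have : altInner (k :: ss) [] = (k :: ss, []) := rfl
    rw [this]
    exact ih (k :: ss)

-- main bridge: from a settled state, the lazy loop returns the initial count plus
-- the number of requests the eager fold over the remaining supply k..n serves
lemma bridge (n : Int) : ∀ (c : Nat) (k : Int) (ss os : List Int) (ans : Int),
    c = (n + 1 - k).toNat → k ≤ n + 1 → altInner ss os = (ss, os) →
    solutionGo os n k ss ans =
      ans + (os.length : Int) -
        ((((PySem.List.pyRange k (n + 1) 1).foldl
            (fun (st : List Int × List Int) box => altInner (box :: st.1) st.2)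
            (ss, os))).2.length : Int) := by
  intro c
  induction c using Nat.strong_induction_on with
  | _ c ih =>
    intro k ss os ans hc hk hset
    by_cases hkn : k ≤ n
    case neg =>
      rw [PySem.List.pyRange_one_eq_nil (by omega)]
      simp only [List.foldl_nil]
      cases os with
      | nil => simp [solutionGo]
      | cons o os =>
        have hpush : solutionPush n k ss o = (k, ss) := push_stop (by omega)
        show (let r := solutionPush n k ss o;
          match r.2 with
          | t' :: ts' => if t' = o then solutionGo os n r.1 ts' (ans + 1) else ans
          | [] => ans) = _
        rw [hpush]
        cases ss with
        | nil => simp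
        | cons t ts =>
          have hne := alt_fix_top_ne hset
          simp [hne]
    case pos =>
    rw [PySem.List.pyRange_one_cons (by omega : k < n + 1)]
    simp only [List.foldl_cons]
    cases os with
    | nil =>
      have h1 : altInner (k :: ss) ([] : List Int) = (k :: ss, []) := rfl
      rw [h1, fold_pending_nil]
      simp [solutionGo]
    | cons o os =>
      have hside : ss = [] ∨ ss.head? ≠ some o := by
        cases ss with
        | nil => exact Or.inl rfl
        | cons t ts =>
          refine Or.inr ?_
          have := alt_fix_top_ne hset
          simp [this]
      by_cases hok : o = k
      case pos =>
        -- eager pushes k and immediately starts popping; lazy pushes k then pops too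
        have hstep : altInner (k :: ss) (o :: os) = altInner ss os := by
          simp [altInner, hok]
        rw [hstep]
        have hpush : solutionPush n k ss o = (k + 1, k :: ss) := by
          rw [push_step hkn hside]
          rw [solutionPush, dif_neg (by simp [hok])]
        have hL : solutionGo (o :: os) n k ss ans = solutionGo os n (k + 1) ss (ans + 1) := by
          show (let r := solutionPush n k ss o;
            match r.2 with
            | t' :: ts' => if t' = o then solutionGo os n r.1 ts' (ans + 1) else ans
            | [] => ans) = _
          rw [hpush]; simp [hok]
        rw [hL, go_inner os ss (ans + 1) n (k + 1), inner_alt ss os (ans + 1)]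
        have hIH := ih (n + 1 - (k + 1)).toNat (by omega) (k + 1)
          (altInner ss os).1 (altInner ss os).2
          (ans + 1 + (os.length : Int) - ((altInner ss os).2.length : Int))
          rfl (by omega) (alt_fix ss os)
        rw [hIH]
        have hcast : ((altInner ss os).2, (altInner ss os).1,
            ans + 1 + (os.length : Int) - ((altInner ss os).2.length : Int)).1
            = (altInner ss os).2 := rfl
        have : (Prod.mk (altInner ss os).1 (altInner ss os).2) = altInner ss os := rfl
        rw [this]
        simp only [List.length_cons]
        push_cast
        omega
      case neg =>
        -- eager pushes k and stops (top k ≠ o); lazy's solutionPush also pushes k first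
        have hstep : altInner (k :: ss) (o :: os) = (k :: ss, o :: os) := by
          simp [altInner, Ne.symm hok]
        rw [hstep]
        have hpush : solutionPush n k ss o = solutionPush n (k + 1) (k :: ss) o :=
          push_step hkn hside
        have hL : solutionGo (o :: os) n k ss ans = solutionGo (o :: os) n (k + 1) (k :: ss) ans := by
          show (let r := solutionPush n k ss o;
            match r.2 with
            | t' :: ts' => if t' = o then solutionGo os n r.1 ts' (ans + 1) else ans
            | [] => ans) = _
          rw [hpush]
          rfl
        rw [hL]
        exact ih (n + 1 - (k + 1)).toNat (by omega) (k + 1) (k :: ss) (o :: os) ans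
          rfl (by omega) hstep

lemma lazy_eq_alt (order : List Int) :
    solutionGo order (order.length : Int) 1 [] 0 = solution_alt order := by
  unfold solution_alt
  have hset : altInner ([] : List Int) order = ([], order) := by
    cases order <;> rfl
  have := bridge (order.length : Int) ((order.length : Int) + 1 - 1).toNat 1 [] order 0
    rfl (by omega) hset
  rw [this]
  push_cast
  ring

lemma ports_eq (order : List Int) : solution order = solution_alt order := by
  rw [A_eq_lazy, lazy_eq_alt]

-- ===== VERDICT (by name: the statement is the Claim_ definition above) =====
theorem solution_spec : Claim_equal_solution := by
  intro order _
  show solution order = solution_alt order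
  exact ports_eq order
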